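-- pv_equiv track=rewrite | github.com/sunnytake/CodeAndDecode | 程序员面试指南/第五章-字符串问题/0左边必有1的二进制字符串数量.py | getNum2
-- ===== SOURCE A (Python) =====
-- def getNum2(n):
--     if n < 1:
--         return 0
--     if n == 1:
--         return 1
--     pre = 1
--     cur = 1
--     for i in range(2, n+1):
--         temp = cur
--         cur += pre
--         pre = temp
--     return cur
-- ===== SOURCE B (Python) =====
-- def getNum2(n):
--     if n < 1:
--         return 0
--
--     def fd(k):
--         # returns (F(k), F(k+1)) with F(0)=0, F(1)=1, by fast doubling
--         if k == 0:
--             return (0, 1)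
--         a, b = fd(k >> 1)
--         c = a * (2 * b - a)
--         d = a * a + b * b
--         if k & 1:
--             return (d, c + d)
--         return (c, d)
--
--     return fd(n + 1)[0]
-- ===== Notes on version B (the rewrite author's own statement) =====
-- stated objective: faster
-- what changed: replaces the linear pre/cur Fibonacci loop with recursive fast doubling (F(2k), F(2k+1) identities), computing the answer in O(log n) multiplications
import Mathlib
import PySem

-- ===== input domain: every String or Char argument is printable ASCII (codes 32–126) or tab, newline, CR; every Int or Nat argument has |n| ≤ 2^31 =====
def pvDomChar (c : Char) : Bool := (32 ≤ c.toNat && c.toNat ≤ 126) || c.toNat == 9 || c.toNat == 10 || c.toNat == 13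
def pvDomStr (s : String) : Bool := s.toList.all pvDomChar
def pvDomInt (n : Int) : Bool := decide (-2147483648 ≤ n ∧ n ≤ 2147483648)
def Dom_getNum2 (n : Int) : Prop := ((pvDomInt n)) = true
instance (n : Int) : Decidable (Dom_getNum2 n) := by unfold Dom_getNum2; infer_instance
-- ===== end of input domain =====

-- B replaces A's linear pre/cur Fibonacci loop by recursive fast doubling (O(log n) multiplications).

-- ===== PORT A =====
def getNum2 (n : Int) : Int :=
  if n < 1 then 0
  else if n = 1 then 1
  else
    -- for i in range(2, n+1): temp = cur; cur += pre; pre = temp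
    ((PySem.List.pyRange 2 (n+1) 1).foldl (fun (s : Int × Int) _ => (s.2, s.2 + s.1)) (1, 1)).2

-- ===== PORT B =====
-- fd(k) returns (F(k), F(k+1)) by fast doubling
def fdAlt : Nat → Int × Int
  | 0 => (0, 1)
  | (k+1) =>
    let p := fdAlt ((k+1)/2)
    let a := p.1
    let b := p.2
    let c := a * (2*b - a)
    let d := a*a + b*b
    if (k+1) % 2 = 1 then (d, c+d) else (c, d)
decreasing_by exact Nat.div_lt_self (Nat.succ_pos k) one_lt_two

def getNum2_alt (n : Int) : Int :=
  if n < 1 then 0 else (fdAlt (n+1).toNat).1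

-- ===== PRECONDITION & SPEC =====
def Spec_getNum2 (n : Int) (out : Int) : Prop := out = getNum2_alt n
instance (n : Int) (out : Int) : Decidable (Spec_getNum2 n out) := by unfold Spec_getNum2; infer_instance

-- ===== CLAIM (what is proved, stated in full; the proofs are below) =====
def Claim_equal_getNum2 : Prop := ∀ (n : Int), Dom_getNum2 n → Spec_getNum2 n (getNum2 n)

-- ===== LEMMAS AND PROOFS =====

def pvF (k : Nat) : Int := Nat.fib k

theorem pvF_add_two (k : Nat) : pvF (k+2) = pvF (k+1) + pvF k := by
  unfold pvF; rw [Nat.fib_add_two]; push_cast; ring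

theorem pvF_two_mul (m : Nat) : pvF (2*m) = pvF m * (2 * pvF (m+1) - pvF m) := by
  have h : Nat.fib m ≤ 2 * Nat.fib (m+1) := by
    have hm : Nat.fib m ≤ Nat.fib (m+1) := Nat.fib_mono (Nat.le_succ m)
    omega
  unfold pvF
  rw [Nat.fib_two_mul, Nat.cast_mul, Nat.cast_sub h]
  push_cast; ring

theorem pvF_two_mul_add_one (m : Nat) : pvF (2*m+1) = pvF (m+1) * pvF (m+1) + pvF m * pvF m := by
  unfold pvF
  rw [Nat.fib_two_mul_add_one]
  push_cast; ring

theorem fdAlt_eq (k : Nat) : fdAlt k = (pvF k, pvF (k+1)) := by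
  induction k using Nat.strong_induction_on with
  | _ k ih =>
    match k with
    | 0 => simp [fdAlt, pvF]
    | (k+1) =>
      rw [fdAlt]
      have ihm := ih ((k+1)/2) (Nat.div_lt_self (Nat.succ_pos k) one_lt_two)
      rw [ihm]
      set m := (k+1)/2 with hm
      by_cases hpar : (k+1) % 2 = 1
      · have hk : k+1 = 2*m + 1 := by omega
        simp only [hpar, if_pos]
        rw [hk]
        have h2 : pvF (2*m+1+1) = pvF (2*m) + pvF (2*m+1) := by
          rw [show (2*m+1+1 : Nat) = 2*m+2 from by ring, pvF_add_two]; ring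
        refine Prod.ext ?_ ?_
        · simp [pvF_two_mul_add_one]; ring
        · simp only []
          rw [h2, pvF_two_mul, pvF_two_mul_add_one]; ring
      · have hk : k+1 = 2*m := by omega
        simp only [hpar, if_false]
        rw [hk]
        refine Prod.ext ?_ ?_
        · simp [pvF_two_mul]
        · simp only []
          rw [pvF_two_mul_add_one]; ring

theorem foldl_step_iterate (l : List Int) (s : Int × Int) :
    l.foldl (fun (s : Int × Int) _ => (s.2, s.2 + s.1)) s =
      (fun (s : Int × Int) => (s.2, s.2 + s.1))^[l.length] s := by
  induction l generalizing s with
  | nil => simp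
  | cons x xs ih =>
    simp [List.foldl_cons, ih, Function.iterate_succ_apply]

theorem iterate_fib (k : Nat) :
    (fun (s : Int × Int) => (s.2, s.2 + s.1))^[k] (1, 1) = (pvF (k+1), pvF (k+2)) := by
  induction k with
  | zero => simp [pvF]
  | succ k ih =>
    rw [Function.iterate_succ_apply', ih]
    show (pvF (k+2), pvF (k+2) + pvF (k+1)) = (pvF (k+2), pvF (k+1+2))
    rw [pvF_add_two (k+1)]

-- ===== VERDICT (by name: the statement is the Claim_ definition above) =====
theorem getNum2_spec : Claim_equal_getNum2 := by
  unfold Claim_equal_getNum2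
  intro n _
  unfold Spec_getNum2 getNum2 getNum2_alt
  by_cases h1 : n < 1
  · simp [h1]
  · simp only [h1, if_false]
    have hn1 : (n+1).toNat = n.toNat + 1 := by omega
    rw [hn1, fdAlt_eq]
    by_cases h2 : n = 1
    · subst h2; simp [pvF]
    · simp only [h2, if_false]
      have hlen : (PySem.List.pyRange 2 (n+1) 1).length = (n-1).toNat := by
        rw [PySem.List.length_pyRange_one]; omega
      rw [foldl_step_iterate, hlen, iterate_fib]
      have : (n-1).toNat + 2 = n.toNat + 1 := by omega
      rw [this]
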